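-- pv_equiv track=rewrite | github.com/incredelous/company_name_spider | filter4me.py | StripLabel
-- ===== SOURCE A (Python) =====
-- def StripLabel(string):#去标签
--     new_string = ""
--     ok = 0
--     for char in string:
--         if char == "<":
--             ok = 1
--             continue
--         if char == ">":
--             ok = 0
--             continue
--         if ok == 0:
--             new_string = new_string + char
--     return new_string
-- ===== SOURCE B (Python) =====
-- def StripLabel(string):
--     parts = string.split("<")
--     out = parts[0].replace(">", "")
--     for p in parts[1:]:
--         out += "".join(p.split(">")[1:])
--     return out
-- ===== Notes on version B (the rewrite author's own statement) =====
-- stated objective: idiomatic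
-- what changed: Replaces the char-by-char flag state machine with a split on the opening bracket into tag-delimited chunks, keeping the stripped prefix chunk and, for each later chunk, only the text after its first closing bracket (split/join library passes).
import Mathlib
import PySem

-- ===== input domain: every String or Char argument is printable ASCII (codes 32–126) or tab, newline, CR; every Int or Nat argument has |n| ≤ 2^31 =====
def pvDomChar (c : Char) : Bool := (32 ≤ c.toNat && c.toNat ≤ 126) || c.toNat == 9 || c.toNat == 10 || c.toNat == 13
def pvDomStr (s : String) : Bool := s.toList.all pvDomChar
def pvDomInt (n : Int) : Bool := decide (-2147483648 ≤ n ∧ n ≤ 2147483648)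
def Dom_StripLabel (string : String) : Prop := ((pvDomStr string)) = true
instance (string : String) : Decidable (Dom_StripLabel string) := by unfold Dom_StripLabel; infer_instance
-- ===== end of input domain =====

-- B replaces A's char-by-char flag loop with split-on-'<' chunk processing (idiomatic, not claimed faster).

-- ===== PORT A =====
-- the loop body of A, branches in source order (ok is Python's int flag)
def pvStepA (st : List Char × Int) (c : Char) : List Char × Int :=
  if c = '<' then (st.1, 1)
  else if c = '>' then (st.1, 0)
  else if st.2 = 0 then (st.1 ++ [c], st.2)
  else st

def StripLabel (string : String) : String :=
  String.ofList (string.toList.foldl pvStepA ([], (0 : Int))).1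

-- ===== PORT B =====
-- parts[0]: str.split always returns a nonempty list, so headD's default is unreachable
def StripLabel_alt (string : String) : String :=
  let parts := PySem.Chars.splitOn string.toList ['<']
  let out0 := PySem.Chars.replace (parts.headD []) ['>'] []
  String.ofList
    ((PySem.List.slice parts (some 1) none).foldl
      (fun out p =>
        out ++ PySem.Chars.join [] (PySem.List.slice (PySem.Chars.splitOn p ['>']) (some 1) none))
      out0)

-- ===== PRECONDITION & SPEC =====
def Spec_StripLabel (string : String) (out : String) : Prop := out = StripLabel_alt string
instance (string : String) (out : String) : Decidable (Spec_StripLabel string out) := by unfold Spec_StripLabel; infer_instance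

-- ===== CLAIM (what is proved, stated in full; the proofs are below) =====
def Claim_equal_StripLabel : Prop := ∀ (string : String), Dom_StripLabel string → Spec_StripLabel string (StripLabel string)

-- ===== LEMMAS AND PROOFS =====

-- recursive spec of A's state machine: inside = the ok flag
def pvFG (inside : Bool) : List Char → List Char
  | [] => []
  | c :: cs =>
    if c = '<' then pvFG true cs
    else if c = '>' then pvFG false cs
    else if inside then pvFG inside cs
    else c :: pvFG inside cs

-- structural version of s.split(sep) for a one-char separator
def pvSplit (sep : Char) : List Char → List (List Char)
  | [] => [[]]
  | c :: cs =>
    if c = sep then [] :: pvSplit sep cs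
    else
      match pvSplit sep cs with
      | [] => [[c]]
      | p :: ps => (c :: p) :: ps

-- what B keeps from a chunk that followed a '<'
def pvAft : List Char → List Char
  | [] => []
  | c :: cs => if c = '>' then cs.filter (fun x => x != '>') else pvAft cs

theorem pvSplit_ne_nil (sep : Char) (cs : List Char) : pvSplit sep cs ≠ [] := by
  induction cs with
  | nil => simp [pvSplit]
  | cons c cs ih =>
    simp only [pvSplit]
    split_ifs
    · simp
    · cases h : pvSplit sep cs <;> simp

theorem pvSplitOn_go_eq (sep : Char) : ∀ (fuel : Nat) (cs cur : List Char) (acc : List (List Char)),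
    cs.length ≤ fuel →
    PySem.Chars.splitOn.go [sep] (fuel + 1) cs cur acc =
      acc.reverse ++
        (match pvSplit sep cs with
         | [] => []
         | p :: ps => (cur.reverse ++ p) :: ps) := by
  intro fuel
  induction fuel with
  | zero =>
    intro cs cur acc h
    have : cs = [] := by cases cs <;> simp_all
    subst this
    simp [PySem.Chars.splitOn.go, pvSplit]
  | succ f ih =>
    intro cs cur acc h
    cases cs with
    | nil => simp [PySem.Chars.splitOn.go, pvSplit]
    | cons c rest =>
      have hr : rest.length ≤ f := by simpa using Nat.lt_succ_iff.mp (by simpa using h)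
      by_cases hc : c = sep
      · subst hc
        have hpre : [c].isPrefixOf (c :: rest) = true := by simp [List.isPrefixOf]
        simp only [PySem.Chars.splitOn.go, hpre, if_pos]
        rw [show (List.drop [c].length (c :: rest)) = rest by simp]
        rw [ih rest [] (cur.reverse :: acc) hr]
        obtain ⟨p, ps, hps⟩ : ∃ p ps, pvSplit c rest = p :: ps := by
          cases h : pvSplit c rest with
          | nil => exact absurd h (pvSplit_ne_nil c rest)
          | cons p ps => exact ⟨p, ps, rfl⟩
        simp [pvSplit, hps]
      · have hpre : [sep].isPrefixOf (c :: rest) = false := by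
          simp [List.isPrefixOf]
          exact fun h' => absurd h'.symm hc
        simp only [PySem.Chars.splitOn.go]
        rw [if_neg (by simp [hpre])]
        rw [ih rest (c :: cur) acc hr]
        obtain ⟨p, ps, hps⟩ : ∃ p ps, pvSplit sep rest = p :: ps := by
          cases h : pvSplit sep rest with
          | nil => exact absurd h (pvSplit_ne_nil sep rest)
          | cons p ps => exact ⟨p, ps, rfl⟩
        simp [pvSplit, hc, hps]

theorem pvSplitOn_eq (sep : Char) (cs : List Char) :
    PySem.Chars.splitOn cs [sep] = pvSplit sep cs := by
  unfold PySem.Chars.splitOn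
  rw [pvSplitOn_go_eq sep cs.length cs [] [] (le_refl _)]
  obtain ⟨p, ps, hps⟩ : ∃ p ps, pvSplit sep cs = p :: ps := by
    cases h : pvSplit sep cs with
    | nil => exact absurd h (pvSplit_ne_nil sep cs)
    | cons p ps => exact ⟨p, ps, rfl⟩
  simp [hps]

theorem pvReplace_go_eq : ∀ (fuel : Nat) (cs acc : List Char),
    cs.length ≤ fuel →
    PySem.Chars.replace.go ['>'] [] fuel cs acc =
      acc.reverse ++ cs.filter (fun x => x != '>') := by
  intro fuel
  induction fuel with
  | zero =>
    intro cs acc h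
    have : cs = [] := by cases cs <;> simp_all
    subst this
    simp [PySem.Chars.replace.go]
  | succ f ih =>
    intro cs acc h
    cases cs with
    | nil => simp [PySem.Chars.replace.go]
    | cons c rest =>
      have hr : rest.length ≤ f := by simpa using Nat.lt_succ_iff.mp (by simpa using h)
      by_cases hc : c = '>'
      · subst hc
        have hpre : ['>'].isPrefixOf ('>' :: rest) = true := by simp [List.isPrefixOf]
        simp only [PySem.Chars.replace.go, hpre]
        rw [show (List.drop ['>'].length ('>' :: rest)) = rest by simp]
        rw [ih rest _ hr]
        simp
      · have hpre : ['>'].isPrefixOf (c :: rest) = false := by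
          simp [List.isPrefixOf]
          exact fun h' => absurd h'.symm hc
        simp only [PySem.Chars.replace.go]
        rw [if_neg (by simp [hpre])]
        rw [ih rest _ hr]
        simp [hc]

theorem pvReplace_gt (cs : List Char) :
    PySem.Chars.replace cs ['>'] [] = cs.filter (fun x => x != '>') := by
  unfold PySem.Chars.replace
  rw [if_neg (by simp)]
  simpa using pvReplace_go_eq cs.length cs [] (le_refl _)

theorem pvJoin_nil_eq_flatten (ps : List (List Char)) :
    PySem.Chars.join [] ps = ps.flatten := by
  induction ps with
  | nil => simp [PySem.Chars.join_nil]
  | cons p rest ih =>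
    cases rest with
    | nil => simp [PySem.Chars.join_singleton]
    | cons q qs =>
      rw [PySem.Chars.join_cons_cons]
      simp [ih]

theorem pvFlatten_pvSplit_gt (cs : List Char) :
    (pvSplit '>' cs).flatten = cs.filter (fun x => x != '>') := by
  induction cs with
  | nil => simp [pvSplit]
  | cons c rest ih =>
    by_cases hc : c = '>'
    · subst hc; simp [pvSplit, ← ih]
    · obtain ⟨p, ps, hps⟩ : ∃ p ps, pvSplit '>' rest = p :: ps := by
        cases h : pvSplit '>' rest with
        | nil => exact absurd h (pvSplit_ne_nil '>' rest)
        | cons p ps => exact ⟨p, ps, rfl⟩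
      simp only [pvSplit, if_neg hc, hps]
      rw [hps] at ih
      simp only [List.flatten_cons] at ih ⊢
      simp [hc, ← ih]

theorem pvAft_eq (p : List Char) :
    PySem.Chars.join [] ((pvSplit '>' p).drop 1) = pvAft p := by
  rw [pvJoin_nil_eq_flatten]
  induction p with
  | nil => simp [pvSplit, pvAft]
  | cons c rest ih =>
    by_cases hc : c = '>'
    · subst hc
      simp only [pvSplit, pvAft, reduceIte]
      exact pvFlatten_pvSplit_gt rest
    · obtain ⟨p, ps, hps⟩ : ∃ p ps, pvSplit '>' rest = p :: ps := by
        cases h : pvSplit '>' rest with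
        | nil => exact absurd h (pvSplit_ne_nil '>' rest)
        | cons p ps => exact ⟨p, ps, rfl⟩
      simp only [pvSplit, if_neg hc, hps, List.drop_succ_cons, List.drop_zero]
      rw [hps] at ih
      simp only [List.drop_succ_cons, List.drop_zero] at ih
      simp [pvAft, hc, ih]

-- A's fold equals the recursive spec, for both flag values
theorem pvFoldA (cs : List Char) : ∀ (acc : List Char),
    (cs.foldl pvStepA (acc, (0 : Int))).1 = acc ++ pvFG false cs ∧
    (cs.foldl pvStepA (acc, (1 : Int))).1 = acc ++ pvFG true cs := by
  induction cs with
  | nil => intro acc; simp [pvFG]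
  | cons c rest ih =>
    intro acc
    by_cases h1 : c = '<'
    · subst h1
      simp only [List.foldl_cons, pvStepA, pvFG, reduceIte]
      exact ⟨(ih acc).2, (ih acc).2⟩
    · by_cases h2 : c = '>'
      · subst h2
        simp only [List.foldl_cons, pvStepA, pvFG, reduceIte]
        exact ⟨(ih acc).1, (ih acc).1⟩
      · simp only [List.foldl_cons, pvStepA, if_neg h1, if_neg h2, pvFG]
        constructor
        · simpa using (ih (acc ++ [c])).1
        · simpa using (ih acc).2

-- the chunk decomposition of the state machine's output
theorem pvMain (cs : List Char) : ∀ (p : List Char) (ps : List (List Char)),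
    pvSplit '<' cs = p :: ps →
    pvFG false cs = p.filter (fun x => x != '>') ++ (ps.map pvAft).flatten ∧
    pvFG true cs = pvAft p ++ (ps.map pvAft).flatten := by
  induction cs with
  | nil =>
    intro p ps h
    simp only [pvSplit] at h
    cases h
    simp [pvFG, pvAft]
  | cons c rest ih =>
    intro p ps h
    obtain ⟨q, qs, hq⟩ : ∃ q qs, pvSplit '<' rest = q :: qs := by
      cases h' : pvSplit '<' rest with
      | nil => exact absurd h' (pvSplit_ne_nil '<' rest)
      | cons q qs => exact ⟨q, qs, rfl⟩
    obtain ⟨h1, h2⟩ := ih q qs hq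
    by_cases hlt : c = '<'
    · subst hlt
      simp only [pvSplit, reduceIte, hq] at h
      cases h
      refine ⟨?_, ?_⟩ <;> simp [pvFG, h2, pvAft]
    · simp only [pvSplit, if_neg hlt, hq] at h
      cases h
      by_cases hgt : c = '>'
      · subst hgt
        refine ⟨?_, ?_⟩ <;>
          simp [pvFG, h1, pvAft]
      · refine ⟨?_, ?_⟩ <;>
          simp [pvFG, hlt, hgt, h1, h2, pvAft]

-- ===== VERDICT (by name: the statement is the Claim_ definition above) =====
theorem StripLabel_spec : Claim_equal_StripLabel := by
  intro string _
  unfold Spec_StripLabel StripLabel StripLabel_alt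
  obtain ⟨p, ps, hps⟩ : ∃ p ps, pvSplit '<' string.toList = p :: ps := by
    cases h : pvSplit '<' string.toList with
    | nil => exact absurd h (pvSplit_ne_nil '<' string.toList)
    | cons p ps => exact ⟨p, ps, rfl⟩
  have hsplit := pvSplitOn_eq '<' string.toList
  rw [hps] at hsplit
  simp only [hsplit, List.headD_cons]
  rw [PySem.List.slice_from _ (by norm_num)]
  simp only [Int.toNat_one, List.drop_succ_cons, List.drop_zero]
  rw [pvReplace_gt]
  rw [PySem.List.foldl_append_eq_flatMap
    (fun p => PySem.Chars.join [] (PySem.List.slice (PySem.Chars.splitOn p ['>']) (some 1) none)) ps]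
  have hfold := (pvFoldA string.toList []).1
  simp only [List.nil_append] at hfold
  rw [hfold, (pvMain string.toList p ps hps).1]
  congr 1
  congr 1
  rw [List.flatMap_def]
  congr 1
  apply List.map_congr_left
  intro q _
  rw [pvSplitOn_eq '>' q, PySem.List.slice_from _ (by norm_num)]
  simpa using (pvAft_eq q).symm
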